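-- pv_equiv track=rewrite | github.com/AlvaroAPPs/PM_APP | app.py | compute_phase_indicator
-- ===== SOURCE A (Python) =====
-- PHASES_INFO = (
--     ("date_kickoff", "Kick-off"),
--     ("date_design", "Design"),
--     ("date_validation", "Validation"),
--     ("date_golive", "Go-live"),
--     ("date_reception", "Reception"),
--     ("date_end", "End"),
-- )
--
-- def compute_phase_indicator(phases_history: list[dict]) -> str:
--     changes: dict[str, dict[str, bool]] = {}
--     for key, _label in PHASES_INFO:
--         changes[key] = {"later": False, "earlier": False, "changed": False}
--
--     for i in range(1, len(phases_history)):
--         prev = phases_history[i - 1]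
--         curr = phases_history[i]
--         for key, _label in PHASES_INFO:
--             prev_date = prev.get(key)
--             curr_date = curr.get(key)
--             if prev_date != curr_date:
--                 changes[key]["changed"] = True
--                 direction = "unknown"
--                 if prev_date and curr_date:
--                     if curr_date > prev_date:
--                         direction = "later"
--                     elif curr_date < prev_date:
--                         direction = "earlier"
--                 if direction == "later":
--                     changes[key]["later"] = True
--                 if direction == "earlier":
--                     changes[key]["earlier"] = True
--
--     for key, _label in PHASES_INFO:
--         if changes[key]["later"]:
--             return "red"
--     for key, _label in PHASES_INFO:
--         if changes[key]["earlier"]: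
--             return "green"
--     for key, _label in PHASES_INFO:
--         if changes[key]["changed"]:
--             return "orange"
--     return "orange"
-- ===== SOURCE B (Python) =====
-- PHASES_INFO = (
--     ("date_kickoff", "Kick-off"),
--     ("date_design", "Design"),
--     ("date_validation", "Validation"),
--     ("date_golive", "Go-live"),
--     ("date_reception", "Reception"),
--     ("date_end", "End"),
-- )
--
-- def compute_phase_indicator(phases_history: list[dict]) -> str:
--     # Severity of one phase's change between two snapshots: 2 = pushed later,
--     # 1 = pulled earlier, 0 = no directional change (missing/empty dates count as 0).
--     def severity(prev_date, curr_date):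
--         if prev_date and curr_date:
--             if curr_date > prev_date:
--                 return 2
--             if curr_date < prev_date:
--                 return 1
--         return 0
--
--     score = max(
--         (severity(prev.get(key), curr.get(key))
--          for prev, curr in zip(phases_history, phases_history[1:])
--          for key, _label in PHASES_INFO),
--         default=0,
--     )
--     return ("orange", "green", "red")[score]
-- ===== Notes on version B (the rewrite author's own statement) =====
-- stated objective: alternative
-- what changed: B replaces A's build-a-table-of-per-phase-flag-dicts followed by three priority return scans with a max-reduction: each (pair, phase) change is mapped to a numeric severity (2 later, 1 earlier, 0 otherwise), the maximum over one flattened generator is taken, and the colour is picked by indexing a tuple, so there are no flags, no mutation and no early-return chain.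
import Mathlib
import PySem

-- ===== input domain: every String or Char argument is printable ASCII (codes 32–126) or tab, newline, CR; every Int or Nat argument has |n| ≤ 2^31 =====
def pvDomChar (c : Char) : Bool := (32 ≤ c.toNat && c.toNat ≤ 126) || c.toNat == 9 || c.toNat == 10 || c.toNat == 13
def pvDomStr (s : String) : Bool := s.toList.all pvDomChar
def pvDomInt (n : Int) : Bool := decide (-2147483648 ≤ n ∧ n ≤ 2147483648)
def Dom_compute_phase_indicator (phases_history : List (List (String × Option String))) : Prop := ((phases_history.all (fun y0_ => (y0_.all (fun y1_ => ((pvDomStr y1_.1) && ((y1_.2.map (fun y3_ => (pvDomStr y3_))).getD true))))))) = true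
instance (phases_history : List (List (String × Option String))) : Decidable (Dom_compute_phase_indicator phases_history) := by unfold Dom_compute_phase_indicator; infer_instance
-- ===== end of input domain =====

-- B replaces A's flag-table-then-three-priority-scans shape by a max-reduction over numeric
-- severities (2 later / 1 earlier / 0) with a table lookup for the colour (objective: alternative).

-- ===== PORT A =====
-- module constant PHASES_INFO (shared data, used by both ports)
def pvPhasesInfo : List (String × String) :=
  [("date_kickoff", "Kick-off"), ("date_design", "Design"), ("date_validation", "Validation"),
   ("date_golive", "Go-live"), ("date_reception", "Reception"), ("date_end", "End")]

-- dict.get(key) on a Python dict passed as an association list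
def pvGet (d : List (String × Option String)) (k : String) : Option String :=
  PySem.Dict.getD (PySem.Dict.mk d) k none

-- Python truthiness of an Optional[str]: None and "" are falsy
def pvTruthy (o : Option String) : Bool := match o with | none => false | some s => s != ""

-- curr_date > prev_date / curr_date < prev_date on Optional[str]; only evaluated under the
-- truthiness guard, where both are strings (Python str comparison = Lean's String '<')
def pvOGt (c p : Option String) : Bool := match c, p with | some cs, some ps => decide (ps < cs) | _, _ => false
def pvOLt (c p : Option String) : Bool := match c, p with | some cs, some ps => decide (cs < ps) | _, _ => false

-- body of A's inner per-key loop (Python mutates changes[key] in place; ported as re-insert)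
def pvStepA (changes : PySem.Dict String (PySem.Dict String Bool)) (key : String)
    (prev_date curr_date : Option String) : PySem.Dict String (PySem.Dict String Bool) :=
  if prev_date ≠ curr_date then
    let changes := PySem.Dict.insert changes key
      (PySem.Dict.insert (PySem.Dict.getD changes key PySem.Dict.empty) "changed" true)
    let direction : String :=
      if pvTruthy prev_date && pvTruthy curr_date then
        (if pvOGt curr_date prev_date then "later"
         else if pvOLt curr_date prev_date then "earlier" else "unknown")
      else "unknown"
    let changes := if direction = "later" then
        PySem.Dict.insert changes key
          (PySem.Dict.insert (PySem.Dict.getD changes key PySem.Dict.empty) "later" true)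
      else changes
    let changes := if direction = "earlier" then
        PySem.Dict.insert changes key
          (PySem.Dict.insert (PySem.Dict.getD changes key PySem.Dict.empty) "earlier" true)
      else changes
    changes
  else changes

def compute_phase_indicator (phases_history : List (List (String × Option String))) : String :=
  let changes : PySem.Dict String (PySem.Dict String Bool) :=
    pvPhasesInfo.foldl (fun d kv =>
      PySem.Dict.insert d kv.1 (PySem.Dict.ofList [("later", false), ("earlier", false), ("changed", false)]))
      PySem.Dict.empty
  let changes :=
    (PySem.List.pyRange 1 (PySem.List.len phases_history) 1).foldl (fun changes i =>
      -- phases_history[i-1] / phases_history[i]: i ∈ range(1, len) is always in range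
      let prev := PySem.List.pyGetD phases_history (i - 1) []
      let curr := PySem.List.pyGetD phases_history i []
      pvPhasesInfo.foldl (fun changes kv =>
        pvStepA changes kv.1 (pvGet prev kv.1) (pvGet curr kv.1))
        changes) changes
  -- three return-on-first-hit scans; changes[key] always present (keys seeded above)
  if pvPhasesInfo.any (fun kv => PySem.Dict.getD (PySem.Dict.getD changes kv.1 PySem.Dict.empty) "later" false) then "red"
  else if pvPhasesInfo.any (fun kv => PySem.Dict.getD (PySem.Dict.getD changes kv.1 PySem.Dict.empty) "earlier" false) then "green"
  else if pvPhasesInfo.any (fun kv => PySem.Dict.getD (PySem.Dict.getD changes kv.1 PySem.Dict.empty) "changed" false) then "orange"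
  else "orange"

-- ===== PORT B =====
-- B's severity of one phase's change between two snapshots: 2 later, 1 earlier, 0 otherwise
def pvSev (prev_date curr_date : Option String) : Int :=
  if pvTruthy prev_date && pvTruthy curr_date then
    (if pvOGt curr_date prev_date then 2 else if pvOLt curr_date prev_date then 1 else 0)
  else 0

def compute_phase_indicator_alt (phases_history : List (List (String × Option String))) : String :=
  -- max(generator, default=0): fold max over the flattened severity list starting from 0
  let score :=
    ((phases_history.zip (PySem.List.slice phases_history (some 1) none)).flatMap (fun pc =>
        pvPhasesInfo.map (fun kv => pvSev (pvGet pc.1 kv.1) (pvGet pc.2 kv.1)))).foldl max 0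
  -- ("orange","green","red")[score]; score is always 0, 1 or 2, so the getD default is dead
  (PySem.List.pyGet? ["orange", "green", "red"] score).getD ""

-- ===== PRECONDITION & SPEC =====
def Spec_compute_phase_indicator (phases_history : List (List (String × Option String))) (out : String) : Prop := out = compute_phase_indicator_alt phases_history
instance (phases_history : List (List (String × Option String))) (out : String) : Decidable (Spec_compute_phase_indicator phases_history out) := by unfold Spec_compute_phase_indicator; infer_instance

-- ===== CLAIM (what is proved, stated in full; the proofs are below) =====
def Claim_equal_compute_phase_indicator : Prop := ∀ (phases_history : List (List (String × Option String))), Dom_compute_phase_indicator phases_history → Spec_compute_phase_indicator phases_history (compute_phase_indicator phases_history)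

-- ===== LEMMAS AND PROOFS =====

-- per-key change conditions
def pvLaterB (p c : Option String) : Bool := pvTruthy p && pvTruthy c && pvOGt c p
def pvEarlierB (p c : Option String) : Bool := pvTruthy p && pvTruthy c && !pvOGt c p && pvOLt c p

lemma pvOGt_self (p : Option String) : pvOGt p p = false := by
  cases p <;> simp [pvOGt]

lemma pvOLt_self (p : Option String) : pvOLt p p = false := by
  cases p <;> simp [pvOLt]

-- pvSev, characterised through the two boolean conditions
lemma pvSev_char (p c : Option String) :
    pvSev p c = if pvLaterB p c then 2 else if pvEarlierB p c then 1 else 0 := by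
  unfold pvSev pvLaterB pvEarlierB
  cases htp : pvTruthy p <;> cases htc : pvTruthy c <;>
    cases hg : pvOGt c p <;> cases hl : pvOLt c p <;> simp

-- flag readers on A's table
def pvLat (d : PySem.Dict String (PySem.Dict String Bool)) (k : String) : Bool :=
  PySem.Dict.getD (PySem.Dict.getD d k PySem.Dict.empty) "later" false
def pvEar (d : PySem.Dict String (PySem.Dict String Bool)) (k : String) : Bool :=
  PySem.Dict.getD (PySem.Dict.getD d k PySem.Dict.empty) "earlier" false

lemma pvLat_stepA (d : PySem.Dict String (PySem.Dict String Bool)) (k : String)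
    (p c : Option String) (k' : String) :
    pvLat (pvStepA d k p c) k' = if k' = k then pvLat d k' || pvLaterB p c else pvLat d k' := by
  unfold pvStepA pvLat pvLaterB
  by_cases hne : p ≠ c
  · simp only [if_pos hne]
    cases htp : pvTruthy p <;> cases htc : pvTruthy c <;>
      cases hg : pvOGt c p <;> cases hl : pvOLt c p <;>
        by_cases hk : k' = k <;>
          simp [hk, PySem.Dict.getD_insert, PySem.Dict.getD_insert_self]
  · push Not at hne
    subst hne
    simp [pvOGt_self]

lemma pvEar_stepA (d : PySem.Dict String (PySem.Dict String Bool)) (k : String)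
    (p c : Option String) (k' : String) :
    pvEar (pvStepA d k p c) k' = if k' = k then pvEar d k' || pvEarlierB p c else pvEar d k' := by
  unfold pvStepA pvEar pvEarlierB
  by_cases hne : p ≠ c
  · simp only [if_pos hne]
    cases htp : pvTruthy p <;> cases htc : pvTruthy c <;>
      cases hg : pvOGt c p <;> cases hl : pvOLt c p <;>
        by_cases hk : k' = k <;>
          simp [hk, PySem.Dict.getD_insert, PySem.Dict.getD_insert_self]
  · push Not at hne
    subst hne
    simp [pvOGt_self, pvOLt_self]

-- 'any over pvPhasesInfo' after a one-key update of the flag function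
lemma pvAny_update {f f' : String → Bool} {k : String} {b : Bool}
    (hk : k ∈ pvPhasesInfo.map Prod.fst)
    (hne : ∀ s : String, s ≠ k → f' s = f s) (hkk : f' k = (f k || b)) :
    pvPhasesInfo.any (fun kv => f' kv.1) = (pvPhasesInfo.any (fun kv => f kv.1) || b) := by
  cases b with
  | false =>
    have hall : ∀ s, f' s = f s := by
      intro s
      by_cases hs : s = k
      · subst hs; simpa using hkk
      · exact hne s hs
    simp only [Bool.or_false]
    exact PySem.List.any_congr_mem (fun kv _ => hall kv.1)
  | true =>
    simp only [Bool.or_true]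
    rcases List.mem_map.mp hk with ⟨kv, hkv, hfst⟩
    exact List.any_eq_true.mpr ⟨kv, hkv, by rw [hfst, hkk]; simp⟩

-- effect of A's inner per-key loop on an 'any flag' over the table, generically in the flag
lemma pvAnyFlag_inner (F : PySem.Dict String (PySem.Dict String Bool) → String → Bool)
    (g : Option String → Option String → Bool)
    (hstep : ∀ d k p c k', F (pvStepA d k p c) k' = if k' = k then F d k' || g p c else F d k')
    (prev curr : List (String × Option String)) :
    ∀ (ks : List (String × String)), (∀ kv ∈ ks, kv.1 ∈ pvPhasesInfo.map Prod.fst) →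
    ∀ d,
      pvPhasesInfo.any (fun kv => F (ks.foldl (fun d kv =>
          pvStepA d kv.1 (pvGet prev kv.1) (pvGet curr kv.1)) d) kv.1)
      = (pvPhasesInfo.any (fun kv => F d kv.1)
          || ks.any (fun kv => g (pvGet prev kv.1) (pvGet curr kv.1))) := by
  intro ks
  induction ks with
  | nil => intro _ d; simp
  | cons x t ih =>
    intro hmem d
    simp only [List.foldl_cons, List.any_cons]
    rw [ih (fun kv hkv => hmem kv (List.mem_cons_of_mem _ hkv))]
    rw [pvAny_update (f := fun s => F d s)
      (f' := fun s => F (pvStepA d x.1 (pvGet prev x.1) (pvGet curr x.1)) s)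
      (b := g (pvGet prev x.1) (pvGet curr x.1))
      (hmem x List.mem_cons_self)
      (fun s hs => by
        show F (pvStepA d x.1 (pvGet prev x.1) (pvGet curr x.1)) s = F d s
        rw [hstep]; simp [hs])
      (by
        show F (pvStepA d x.1 (pvGet prev x.1) (pvGet curr x.1)) x.1
          = (F d x.1 || g (pvGet prev x.1) (pvGet curr x.1))
        rw [hstep]; simp)]
    rw [Bool.or_assoc]

-- effect of A's outer pair loop on an 'any flag' over the table
lemma pvAnyFlag_outer (F : PySem.Dict String (PySem.Dict String Bool) → String → Bool)
    (g : Option String → Option String → Bool)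
    (hstep : ∀ d k p c k', F (pvStepA d k p c) k' = if k' = k then F d k' || g p c else F d k') :
    ∀ (pairs : List (List (String × Option String) × List (String × Option String))) d,
      pvPhasesInfo.any (fun kv => F (pairs.foldl (fun d pc =>
          pvPhasesInfo.foldl (fun d kv =>
            pvStepA d kv.1 (pvGet pc.1 kv.1) (pvGet pc.2 kv.1)) d) d) kv.1)
      = (pvPhasesInfo.any (fun kv => F d kv.1)
          || pairs.any (fun pc => pvPhasesInfo.any (fun kv =>
              g (pvGet pc.1 kv.1) (pvGet pc.2 kv.1)))) := by
  intro pairs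
  induction pairs with
  | nil => intro d; simp
  | cons pc t ih =>
    intro d
    simp only [List.foldl_cons, List.any_cons]
    rw [ih]
    rw [pvAnyFlag_inner F g hstep pc.1 pc.2 pvPhasesInfo
      (fun kv hkv => List.mem_map_of_mem hkv) d]
    rw [Bool.or_assoc]

-- the consecutive pairs, as a map over indices
lemma pvZip_tail {α : Type} (h : List α) (d : α) :
    h.zip h.tail = (List.range (h.length - 1)).map (fun k => (h.getD k d, h.getD (k + 1) d)) := by
  apply List.ext_getElem
  · simp only [List.length_zip, List.length_tail, List.length_map, List.length_range]
    omega
  · intro k h1 h2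
    simp only [List.length_zip, List.length_tail] at h1
    have hk : k + 1 < h.length := by omega
    simp [List.getElem_zip, List.getElem_tail, List.getD_eq_getElem?_getD,
      List.getElem?_eq_getElem (by omega : k < h.length), List.getElem?_eq_getElem hk]

-- A's index loop over range(1, len) with h[i-1], h[i] IS the fold over consecutive pairs
lemma pvRange_pairs {α σ : Type} (h : List α) (d : α) (F : σ → α → α → σ) (init : σ) :
    (PySem.List.pyRange 1 (PySem.List.len h) 1).foldl
        (fun s i => F s (PySem.List.pyGetD h (i - 1) d) (PySem.List.pyGetD h i d)) init
      = (h.zip h.tail).foldl (fun s pc => F s pc.1 pc.2) init := by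
  rw [PySem.List.pyRange_one, List.foldl_map, pvZip_tail h d, List.foldl_map]
  have hlen : ((PySem.List.len h) - 1).toNat = h.length - 1 := by
    simp only [PySem.List.len_eq]
    omega
  rw [hlen]
  apply PySem.List.foldl_congr_mem
  intro s k hk
  have hk' : k < h.length - 1 := by simpa using (List.mem_range.mp hk)
  have e1 : (1 : Int) + (k : Int) - 1 = ((k : Nat) : Int) := by omega
  have e2 : (1 : Int) + (k : Int) = (((k + 1 : Nat)) : Int) := by omega
  rw [e1, e2, PySem.List.pyGetD_natCast, PySem.List.pyGetD_natCast]

-- initial table: both flags read false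
lemma pvInitLat :
    pvPhasesInfo.any (fun kv => PySem.Dict.getD (PySem.Dict.getD
      (pvPhasesInfo.foldl (fun d kv =>
        PySem.Dict.insert d kv.1 (PySem.Dict.ofList [("later", false), ("earlier", false), ("changed", false)]))
        PySem.Dict.empty) kv.1 PySem.Dict.empty) "later" false) = false := by decide

lemma pvInitEar :
    pvPhasesInfo.any (fun kv => PySem.Dict.getD (PySem.Dict.getD
      (pvPhasesInfo.foldl (fun d kv =>
        PySem.Dict.insert d kv.1 (PySem.Dict.ofList [("later", false), ("earlier", false), ("changed", false)]))
        PySem.Dict.empty) kv.1 PySem.Dict.empty) "earlier" false) = false := by decide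

-- fold of max over a list of severities = the priority of the strongest change present
lemma pvFoldMax_comm (l : List Int) : ∀ a b : Int, l.foldl max (max a b) = max a (l.foldl max b) := by
  induction l with
  | nil => intro a b; simp
  | cons x t ih =>
    intro a b
    simp only [List.foldl_cons]
    rw [max_assoc, ih]

lemma pvFoldMax_sev (l : List (Option String × Option String)) :
    (l.map (fun pc => pvSev pc.1 pc.2)).foldl max 0
      = (if l.any (fun pc => pvLaterB pc.1 pc.2) then 2
         else if l.any (fun pc => pvEarlierB pc.1 pc.2) then 1 else 0) := by
  induction l with
  | nil => simp
  | cons x t ih =>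
    simp only [List.map_cons, List.foldl_cons, List.any_cons]
    have : max 0 (pvSev x.1 x.2) = max (pvSev x.1 x.2) 0 := max_comm _ _
    rw [this, pvFoldMax_comm, ih, pvSev_char]
    by_cases hl : pvLaterB x.1 x.2 = true <;> by_cases he : pvEarlierB x.1 x.2 = true <;>
      by_cases htl : (t.any fun pc => pvLaterB pc.1 pc.2) = true <;>
      by_cases hte : (t.any fun pc => pvEarlierB pc.1 pc.2) = true <;>
      simp [hl, he, htl, hte]

-- ===== VERDICT (by name: the statement is the Claim_ definition above) =====
theorem compute_phase_indicator_spec : Claim_equal_compute_phase_indicator := by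
  intro h _
  simp only [Spec_compute_phase_indicator, compute_phase_indicator, compute_phase_indicator_alt,
    PySem.List.slice_from_one]
  rw [pvRange_pairs h []
    (F := fun changes prev curr => pvPhasesInfo.foldl (fun changes kv =>
      pvStepA changes kv.1 (pvGet prev kv.1) (pvGet curr kv.1)) changes)]
  rw [pvAnyFlag_outer
    (fun d k => PySem.Dict.getD (PySem.Dict.getD d k PySem.Dict.empty) "later" false)
    pvLaterB pvLat_stepA]
  rw [pvAnyFlag_outer
    (fun d k => PySem.Dict.getD (PySem.Dict.getD d k PySem.Dict.empty) "earlier" false)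
    pvEarlierB pvEar_stepA]
  simp only [pvInitLat, pvInitEar, Bool.false_or]
  -- rewrite B's flattened severity list as a map over (prev_date, curr_date) pairs
  have hflat :
      (h.zip h.tail).flatMap (fun pc =>
          pvPhasesInfo.map (fun kv => pvSev (pvGet pc.1 kv.1) (pvGet pc.2 kv.1)))
        = ((h.zip h.tail).flatMap (fun pc =>
            pvPhasesInfo.map (fun kv => (pvGet pc.1 kv.1, pvGet pc.2 kv.1)))).map
              (fun pc => pvSev pc.1 pc.2) := by
    simp [List.map_flatMap, Function.comp_def, List.map_map]
  rw [hflat, pvFoldMax_sev]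
  simp only [List.any_flatMap, List.any_map, Function.comp_def]
  by_cases hl : (h.zip h.tail).any (fun pc => pvPhasesInfo.any
      (fun kv => pvLaterB (pvGet pc.1 kv.1) (pvGet pc.2 kv.1))) = true <;>
    by_cases he : (h.zip h.tail).any (fun pc => pvPhasesInfo.any
      (fun kv => pvEarlierB (pvGet pc.1 kv.1) (pvGet pc.2 kv.1))) = true <;>
    simp [hl, he, PySem.List.pyGet?, PySem.List.pyIdx?]
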